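-- pv_equiv track=rewrite | github.com/Catalyn45/jaque | exceptions.py | _get_line_index
-- ===== SOURCE A (Python) =====
-- def _get_line_index(content, line):
--     index = 0
--
--     while line > 0:
--         index = content.find("\n", index)
--         if index == -1:
--             raise Exception("something wrong")
--
--         index += 1
--         line -= 1
--
--     return index
-- ===== SOURCE B (Python) =====
-- def _get_line_index(content, line):
--     if line <= 0:
--         return 0
--     starts = [i + 1 for i, c in enumerate(content) if c == "\n"]
--     if line > len(starts):
--         raise Exception("something wrong")
--     return starts[line - 1]
-- ===== Notes on version B (the rewrite author's own statement) =====
-- stated objective: simpler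
-- what changed: Replaces A's incremental find-and-advance while-loop with a single comprehension that collects every line-start offset (newline index + 1) once and then indexes the requested one directly.
import Mathlib
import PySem

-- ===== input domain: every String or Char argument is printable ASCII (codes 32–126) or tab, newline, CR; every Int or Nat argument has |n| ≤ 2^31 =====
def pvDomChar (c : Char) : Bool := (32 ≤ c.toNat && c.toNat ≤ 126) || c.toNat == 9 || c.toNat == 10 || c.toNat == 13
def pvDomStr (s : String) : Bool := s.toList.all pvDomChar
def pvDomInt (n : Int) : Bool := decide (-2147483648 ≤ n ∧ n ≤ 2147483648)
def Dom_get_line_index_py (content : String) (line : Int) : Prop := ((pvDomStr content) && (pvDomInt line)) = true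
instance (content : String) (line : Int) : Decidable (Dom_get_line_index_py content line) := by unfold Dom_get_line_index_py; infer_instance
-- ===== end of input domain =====

-- B replaces A's incremental find-and-advance while-loop by collecting all line-start
-- offsets once with a comprehension and indexing the requested one (objective: simpler).

-- ===== PORT A =====
-- A's while-loop: state (index, line); `none` = the `raise Exception` branch.
def getLineIndexGo (cs : List Char) (index : Int) (line : Int) : Option Int :=
  if _h : 0 < line then
    let i := PySem.Chars.findFrom cs ['\n'] index none
    if i = -1 then none
    else getLineIndexGo cs (i + 1) (line - 1)
  else some index
termination_by line.toNat
decreasing_by omega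

def get_line_index_py (content : String) (line : Int) : Int :=
  (getLineIndexGo content.toList 0 line).getD 0

-- ===== PORT B =====
-- Source B: early return 0; starts = [i+1 for i, c in enumerate(content) if c == "\n"];
-- the `raise` branch (line > len(starts)) is outside Pre_ and returns 0 here.
def get_line_index_py_alt (content : String) (line : Int) : Int :=
  if line ≤ 0 then 0
  else
    let starts := (PySem.List.enumerate content.toList 0).filterMap
      (fun p => if p.2 = '\n' then some (p.1 + 1) else none)
    if line > (starts.length : Int) then 0
    else (PySem.List.pyGet? starts (line - 1)).getD 0

-- ===== PRECONDITION & SPEC =====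
-- Pre_ excludes exactly the inputs on which A raises Exception("something wrong"):
-- line larger than the number of newlines in content.
def Pre_get_line_index_py (content : String) (line : Int) : Prop :=
  line ≤ (content.toList.count '\n' : Int)
instance (content : String) (line : Int) : Decidable (Pre_get_line_index_py content line) := by
  unfold Pre_get_line_index_py; infer_instance

def pvWitness_get_line_index_py : String × Int := ("a\nb\n", 2)

def Spec_get_line_index_py (content : String) (line : Int) (out : Int) : Prop :=
  out = get_line_index_py_alt content line
instance (content : String) (line : Int) (out : Int) : Decidable (Spec_get_line_index_py content line out) := by
  unfold Spec_get_line_index_py; infer_instance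

-- ===== CLAIM (what is proved, stated in full; the proofs are below) =====
def Claim_equal_get_line_index_py : Prop := ∀ (content : String) (line : Int), Dom_get_line_index_py content line → Pre_get_line_index_py content line → Spec_get_line_index_py content line (get_line_index_py content line)

-- ===== LEMMAS AND PROOFS =====

-- proof-side spec of B's comprehension: offsets just after each newline, scanning from index i
def nlStarts : List Char → Int → List Int
  | [], _ => []
  | c :: t, i => if c = '\n' then (i + 1) :: nlStarts t (i + 1) else nlStarts t (i + 1)

theorem nlStarts_cons_nl (t : List Char) (i : Int) :
    nlStarts ('\n' :: t) i = (i + 1) :: nlStarts t (i + 1) := by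
  simp [nlStarts]

theorem nlStarts_cons_of_ne (c : Char) (t : List Char) (i : Int) (h : c ≠ '\n') :
    nlStarts (c :: t) i = nlStarts t (i + 1) := by
  simp [nlStarts, h]

theorem filterMap_enumerate_eq_nlStarts (cs : List Char) (i : Int) :
    (PySem.List.enumerate cs i).filterMap
      (fun p => if p.2 = '\n' then some (p.1 + 1) else none) = nlStarts cs i := by
  induction cs generalizing i with
  | nil => simp [PySem.List.enumerate_nil, nlStarts]
  | cons c t ih =>
    rw [PySem.List.enumerate_cons]
    by_cases h : c = '\n' <;> simp [nlStarts, h, ih]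

theorem nlStarts_shift (cs : List Char) (i : Int) :
    nlStarts cs i = (nlStarts cs 0).map (· + i) := by
  induction cs generalizing i with
  | nil => simp [nlStarts]
  | cons c t ih =>
    by_cases h : c = '\n'
    · subst h
      rw [nlStarts_cons_nl, nlStarts_cons_nl, List.map_cons,
          ih (i + 1), ih (0 + 1), List.map_map]
      refine List.cons_eq_cons.mpr ⟨by omega, ?_⟩
      apply List.map_congr_left
      intro x _
      simp [Function.comp]
      omega
    · rw [nlStarts_cons_of_ne _ _ _ h, nlStarts_cons_of_ne _ _ _ h,
          ih (i + 1), ih (0 + 1), List.map_map]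
      apply List.map_congr_left
      intro x _
      simp [Function.comp]
      omega

theorem nlStarts_length (cs : List Char) (i : Int) :
    (nlStarts cs i).length = cs.count '\n' := by
  induction cs generalizing i with
  | nil => simp [nlStarts]
  | cons c t ih =>
    by_cases h : c = '\n' <;> simp [nlStarts, h, ih]

theorem nlStarts_append_no (u w : List Char) (i : Int) (hu : '\n' ∉ u) :
    nlStarts (u ++ w) i = nlStarts w (i + u.length) := by
  induction u generalizing i with
  | nil => simp
  | cons c t ih =>
    have hc : c ≠ '\n' := fun h => hu (h ▸ List.mem_cons_self)
    have ht : '\n' ∉ t := fun h => hu (List.mem_cons_of_mem _ h)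
    rw [List.cons_append, nlStarts_cons_of_ne _ _ _ hc, ih (i + 1) ht, List.length_cons]
    congr 1
    push_cast
    ring

-- shifting the scan start of A's loop to a suffix
theorem getLineIndexGo_shift (n : Nat) (cs : List Char) (k : Nat) (hk : k ≤ cs.length) :
    getLineIndexGo cs (k : Int) (n : Int) =
      (getLineIndexGo (cs.drop k) 0 (n : Int)).map (· + (k : Int)) := by
  induction n generalizing cs k with
  | zero => simp [getLineIndexGo]
  | succ n ih =>
    have hpos : (0 : Int) < ((n : Int) + 1) := by positivity
    rw [getLineIndexGo, getLineIndexGo]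
    push_cast
    rw [dif_pos hpos, dif_pos hpos]
    rw [PySem.Chars.findFrom_natCast cs ['\n'] k hk, PySem.Chars.findFrom_zero]
    set f := PySem.Chars.find (cs.drop k) ['\n'] with hf
    by_cases hneg : f = -1
    · simp [hneg]
    · have hf0 : 0 ≤ f := by
        have := PySem.Chars.neg_one_le_find (cs.drop k) ['\n']
        rw [← hf] at this; omega
      have hspec := PySem.Chars.find_spec (s := cs.drop k) (sub := ['\n']) hf0
      rw [← hf] at hspec
      have hlt : f.toNat < (cs.drop k).length := by
        rcases hspec.1 with ⟨t, ht⟩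
        have hlen1 : (List.drop f.toNat (cs.drop k)).length = t.length + 1 := by
          rw [← ht]; simp
        simp only [List.length_drop] at hlen1 ⊢
        omega
      simp only [if_neg hneg]
      rw [if_neg (by omega : ¬((k : Int) + f = -1))]
      have hsub : ((n : Int) + 1 - 1) = (n : Int) := by ring
      rw [hsub]
      have hkf : f + 1 = ((f.toNat + 1 : Nat) : Int) := by omega
      have hkf2 : (k : Int) + f + 1 = ((k + f.toNat + 1 : Nat) : Int) := by omega
      have h1 : k + f.toNat + 1 ≤ cs.length := by
        have := List.length_drop (l := cs) (i := k)
        omega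
      have h2 : f.toNat + 1 ≤ (cs.drop k).length := by omega
      rw [hkf2, ih cs (k + f.toNat + 1) h1, hkf, ih (cs.drop k) (f.toNat + 1) h2]
      rw [List.drop_drop]
      rw [show k + (f.toNat + 1) = k + f.toNat + 1 from by omega, Option.map_map]
      congr 1
      funext x
      simp [Function.comp]
      omega

-- A's loop computes the n-th line start (0-based list 0 :: nlStarts)
theorem getLineIndexGo_eq (n : Nat) (cs : List Char) (h : n ≤ cs.count '\n') :
    getLineIndexGo cs 0 (n : Int) = some ((0 :: nlStarts cs 0).getD n 0) := by
  induction n generalizing cs with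
  | zero => simp [getLineIndexGo]
  | succ n ih =>
    have hmem : '\n' ∈ cs := List.count_pos_iff.mp (by omega)
    have hinf : ['\n'] <:+: cs := by
      rcases List.append_of_mem hmem with ⟨u, v, huv⟩
      exact ⟨u, v, by simp [huv]⟩
    have hf0 : 0 ≤ PySem.Chars.find cs ['\n'] :=
      (PySem.Chars.find_nonneg_iff cs ['\n']).mpr hinf
    have hspec := PySem.Chars.find_spec (s := cs) (sub := ['\n']) hf0
    set p := (PySem.Chars.find cs ['\n']).toNat with hpdef
    have hlt : p < cs.length := by
      rcases hspec.1 with ⟨t, ht⟩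
      have hlen1 : (List.drop p cs).length = t.length + 1 := by
        rw [← ht]; simp
      simp only [List.length_drop] at hlen1 ⊢
      omega
    have hget : cs[p] = '\n' := by
      rcases hspec.1 with ⟨t, ht⟩
      have hd := List.drop_eq_getElem_cons hlt
      rw [hd] at ht
      exact (List.cons_eq_cons.mp ht).1.symm
    have hdecomp : cs = cs.take p ++ '\n' :: cs.drop (p + 1) := by
      conv_lhs => rw [← List.take_append_drop p cs]
      rw [List.drop_eq_getElem_cons hlt, hget]
    have hno : '\n' ∉ cs.take p := by
      intro hmem'
      rcases List.mem_take_iff_getElem.mp hmem' with ⟨j, hj, hje⟩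
      have hjp : j < p := by omega
      have hjlen : j < cs.length := by omega
      apply hspec.2 j hjp
      exact ⟨cs.drop (j + 1), by simp [List.drop_eq_getElem_cons hjlen, hje]⟩
    have htakelen : (cs.take p).length = p := by simp; omega
    have hcsplit : cs.count '\n' = (cs.take p).count '\n' + 1 + (cs.drop (p + 1)).count '\n' := by
      conv_lhs => rw [hdecomp]
      simp [List.count_append]
      omega
    have hz : (cs.take p).count '\n' = 0 := List.count_eq_zero.mpr hno
    have hcount : n ≤ (cs.drop (p + 1)).count '\n' := by omega
    have hpos : (0 : Int) < ((n : Int) + 1) := by positivity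
    rw [getLineIndexGo]
    push_cast
    rw [dif_pos hpos]
    rw [PySem.Chars.findFrom_zero]
    rw [if_neg (by omega : ¬(PySem.Chars.find cs ['\n'] = -1))]
    have hstep : PySem.Chars.find cs ['\n'] + 1 = ((p + 1 : Nat) : Int) := by omega
    rw [hstep]
    have hsub : ((n : Int) + 1 - 1) = (n : Int) := by ring
    rw [hsub]
    rw [getLineIndexGo_shift n cs (p + 1) (by omega)]
    rw [ih (cs.drop (p + 1)) hcount]
    have hns : nlStarts cs 0 =
        ((p : Int) + 1) :: (nlStarts (cs.drop (p + 1)) 0).map (· + ((p : Int) + 1)) := by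
      conv_lhs => rw [hdecomp]
      rw [nlStarts_append_no _ _ _ hno, htakelen, nlStarts_cons_nl,
          nlStarts_shift (cs.drop (p + 1)) (0 + (p : Int) + 1)]
      refine List.cons_eq_cons.mpr ⟨by omega, ?_⟩
      apply List.map_congr_left
      intro x _
      omega
    rw [hns]
    simp only [Option.map_some, Option.some.injEq]
    cases n with
    | zero => simp
    | succ m =>
      have hlen : m < (nlStarts (cs.drop (p + 1)) 0).length := by
        rw [nlStarts_length]; omega
      have hlen2 : m < ((nlStarts (cs.drop (p + 1)) 0).map (· + ((p : Int) + 1))).length := by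
        simpa using hlen
      simp only [List.getD_cons_succ]
      rw [List.getD_eq_getElem _ _ hlen2, List.getD_eq_getElem _ _ hlen]
      simp

-- ===== VERDICT (by name: the statement is the Claim_ definition above) =====
theorem get_line_index_py_spec : Claim_equal_get_line_index_py := by
  intro content line _hdom hpre
  unfold Spec_get_line_index_py get_line_index_py get_line_index_py_alt
  unfold Pre_get_line_index_py at hpre
  rw [filterMap_enumerate_eq_nlStarts]
  by_cases hle : line ≤ 0
  · rw [if_pos hle, getLineIndexGo, dif_neg (by omega)]
    rfl
  · rw [if_neg hle]
    obtain ⟨n, rfl⟩ : ∃ n : Nat, line = (n : Int) := ⟨line.toNat, by omega⟩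
    have hn1 : 1 ≤ n := by omega
    have hcount : n ≤ content.toList.count '\n' := by omega
    have hlen : (nlStarts content.toList 0).length = content.toList.count '\n' :=
      nlStarts_length _ _
    rw [if_neg (by rw [hlen]; omega)]
    rw [getLineIndexGo_eq n content.toList hcount]
    have hncast : ((n : Int) - 1) = ((n - 1 : Nat) : Int) := by omega
    rw [hncast, PySem.List.pyGet?_natCast]
    have hidx : n - 1 < (nlStarts content.toList 0).length := by omega
    rw [List.getElem?_eq_getElem hidx]
    simp only [Option.getD_some]
    cases n with
    | zero => omega
    | succ m =>
      simp only [List.getD_cons_succ, Nat.add_sub_cancel]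
      exact List.getD_eq_getElem _ _ (by omega)
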